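-- pv_equiv track=rewrite | github.com/Tayjsl97/RL-Chord | evaluate_utils.py | merge_chord
-- ===== SOURCE A (Python) =====
-- def merge_chord(chords,positions,durations):
--     '''
--         merge the same chords within a bar
--     '''
--     new_chords=[]
--     new_durations=[]
--     assert len(chords)==len(positions)==len(durations)
--     i=0
--     while i < len(chords):
--         start = i
--         while i<len(chords)-1 and chords[i]==chords[i+1]:
--             i+=1
--         i+=1
--         end=i
--         slice_start=start
--         for j in range(start,end):
--             if j<end-1 and positions[j]>=positions[j+1]:
--                 new_chords.append(chords[start])
--                 new_durations.append(sum(durations[slice_start:j+1]))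
--                 slice_start=j+1
--             if j==end-1:
--                 new_chords.append(chords[start])
--                 new_durations.append(sum(durations[slice_start:end]))
--     return new_chords,new_durations
-- ===== SOURCE B (Python) =====
-- def merge_chord(chords, positions, durations):
--     '''
--         merge the same chords within a bar
--     '''
--     assert len(chords) == len(positions) == len(durations)
--     new_chords = []
--     new_durations = []
--     n = len(chords)
--     i = 0
--     while i < n:
--         j = i
--         while j + 1 < n and chords[j] == chords[j + 1] and positions[j] < positions[j + 1]:
--             j += 1
--         new_chords.append(chords[i])
--         new_durations.append(sum(durations[i:j + 1]))
--         i = j + 1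
--     return new_chords, new_durations
-- ===== Notes on version B (the rewrite author's own statement) =====
-- stated objective: simpler
-- what changed: Replaces A's run-grouping while-loop plus inner split/for pass with slice_start bookkeeping by a single while loop whose one combined boundary predicate (chord changes or position fails to increase) delimits each emitted segment.
import Mathlib
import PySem

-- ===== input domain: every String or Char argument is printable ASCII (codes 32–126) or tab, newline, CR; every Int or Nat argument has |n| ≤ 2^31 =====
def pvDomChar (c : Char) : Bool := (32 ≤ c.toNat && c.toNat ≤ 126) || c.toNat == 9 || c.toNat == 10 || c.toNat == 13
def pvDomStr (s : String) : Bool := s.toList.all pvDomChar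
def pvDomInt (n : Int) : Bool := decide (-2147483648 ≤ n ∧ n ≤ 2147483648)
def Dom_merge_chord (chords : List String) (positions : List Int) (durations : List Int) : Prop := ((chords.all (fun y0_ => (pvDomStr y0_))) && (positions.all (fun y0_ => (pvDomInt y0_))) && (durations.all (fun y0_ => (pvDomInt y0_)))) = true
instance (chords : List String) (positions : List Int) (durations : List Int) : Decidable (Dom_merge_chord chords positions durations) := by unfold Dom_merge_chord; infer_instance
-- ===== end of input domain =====

-- B replaces A's run-grouping loop plus inner split pass by ONE loop whose single
-- boundary predicate combines "chord changes" and "position does not increase" (objective: simpler).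
-- Both ports index with getD defaults; inside Pre_ (equal lengths) every index the
-- Pythons read is in range, so the defaults are never the value of an actual read.

-- sum(durations[a:b]) for 0 ≤ a ≤ b (Python slice sum; exact for Nat bounds)
def sumSlice (d : List Int) (a b : Nat) : Int := ((d.drop a).take (b - a)).sum

-- ===== PORT A =====
-- inner 'while i<len(chords)-1 and chords[i]==chords[i+1]: i+=1' followed by 'i+=1': returns the new i (= end)
def runEnd (c : List String) (i : Nat) : Nat :=
  if h : i < c.length - 1 ∧ c.getD i "" = c.getD (i + 1) "" then runEnd c (i + 1) else i + 1
termination_by c.length - i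
decreasing_by exact Nat.sub_succ_lt_self c.length i (Nat.lt_of_lt_of_le h.1 (Nat.sub_le _ _))

-- 'for j in range(start,end)' with state slice_start = ss; emissions are prepended
def innerA (c : List String) (p d : List Int) (s e ss j : Nat) : List String × List Int :=
  if hj : j < e then
    if j < e - 1 ∧ p.getD j 0 ≥ p.getD (j + 1) 0 then
      (c.getD s "" :: (innerA c p d s e (j + 1) (j + 1)).1,
       sumSlice d ss (j + 1) :: (innerA c p d s e (j + 1) (j + 1)).2)
    else if j = e - 1 then
      ([c.getD s ""], [sumSlice d ss e])
    else innerA c p d s e ss (j + 1)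
  else ([], [])
termination_by e - j
decreasing_by all_goals exact Nat.sub_succ_lt_self e j hj

theorem runEnd_gt (c : List String) (i : Nat) : i < runEnd c i := by
  unfold runEnd; split
  · have := runEnd_gt c (i + 1); omega
  · omega
termination_by c.length - i
decreasing_by omega

-- outer 'while i < len(chords)'
def outerA (c : List String) (p d : List Int) (i : Nat) : List String × List Int :=
  if hi : i < c.length then
    ((innerA c p d i (runEnd c i) i i).1 ++ (outerA c p d (runEnd c i)).1,
     (innerA c p d i (runEnd c i) i i).2 ++ (outerA c p d (runEnd c i)).2)
  else ([], [])
termination_by c.length - i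
decreasing_by exact Nat.sub_lt_sub_left hi (runEnd_gt c i)

def merge_chord (chords : List String) (positions : List Int) (durations : List Int) : List String × List Int :=
  outerA chords positions durations 0

-- ===== PORT B =====
-- 'while j+1<n and chords[j]==chords[j+1] and positions[j]<positions[j+1]: j+=1'
def segEnd (c : List String) (p : List Int) (j : Nat) : Nat :=
  if h : j + 1 < c.length ∧ c.getD j "" = c.getD (j + 1) "" ∧ p.getD j 0 < p.getD (j + 1) 0 then
    segEnd c p (j + 1)
  else j
termination_by c.length - j
decreasing_by exact Nat.sub_succ_lt_self c.length j (Nat.lt_of_succ_lt h.1)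

theorem segEnd_ge (c : List String) (p : List Int) (j : Nat) : j ≤ segEnd c p j := by
  unfold segEnd; split
  · have := segEnd_ge c p (j + 1); omega
  · omega
termination_by c.length - j
decreasing_by omega

-- 'while i < n' with the two appends per iteration
def loopB (c : List String) (p d : List Int) (i : Nat) : List String × List Int :=
  if h : i < c.length then
    (c.getD i "" :: (loopB c p d (segEnd c p i + 1)).1,
     sumSlice d i (segEnd c p i + 1) :: (loopB c p d (segEnd c p i + 1)).2)
  else ([], [])
termination_by c.length - i
decreasing_by exact Nat.lt_of_le_of_lt (Nat.sub_le_sub_left (Nat.succ_le_succ (segEnd_ge c p i)) c.length) (Nat.sub_succ_lt_self c.length i h)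

def merge_chord_alt (chords : List String) (positions : List Int) (durations : List Int) : List String × List Int :=
  loopB chords positions durations 0

-- ===== PRECONDITION & SPEC =====
-- Pre_ excludes exactly the inputs on which A's assert raises AssertionError: unequal lengths.
def Pre_merge_chord (chords : List String) (positions : List Int) (durations : List Int) : Prop :=
  chords.length = positions.length ∧ positions.length = durations.length
instance (chords : List String) (positions : List Int) (durations : List Int) : Decidable (Pre_merge_chord chords positions durations) := by unfold Pre_merge_chord; infer_instance

def pvWitness_merge_chord : List String × List Int × List Int :=
  (["C", "C", "C", "G"], [0, 1, 0, 2], [1, 2, 3, 4])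

def Spec_merge_chord (chords : List String) (positions : List Int) (durations : List Int) (out : List String × List Int) : Prop := out = merge_chord_alt chords positions durations
instance (chords : List String) (positions : List Int) (durations : List Int) (out : List String × List Int) : Decidable (Spec_merge_chord chords positions durations out) := by unfold Spec_merge_chord; infer_instance

-- ===== CLAIM (what is proved, stated in full; the proofs are below) =====
def Claim_equal_merge_chord : Prop := ∀ (chords : List String) (positions : List Int) (durations : List Int), Dom_merge_chord chords positions durations → Pre_merge_chord chords positions durations → Spec_merge_chord chords positions durations (merge_chord chords positions durations)

-- ===== LEMMAS AND PROOFS =====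

theorem runEnd_props (c : List String) (i : Nat) (hi : i < c.length) :
    runEnd c i ≤ c.length ∧
    (∀ k, i ≤ k → k + 1 < runEnd c i → c.getD k "" = c.getD (k + 1) "") ∧
    (runEnd c i = c.length ∨ c.getD (runEnd c i - 1) "" ≠ c.getD (runEnd c i) "") := by
  unfold runEnd
  split
  · rename_i h
    obtain ⟨h1, h2, h3⟩ := runEnd_props c (i + 1) (by omega)
    refine ⟨h1, ?_, h3⟩
    intro k hk hk2
    rcases Nat.eq_or_lt_of_le hk with rfl | hk'
    · exact h.2
    · exact h2 k hk' hk2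
  · rename_i h
    refine ⟨by omega, by intro k hk hk2; omega, ?_⟩
    by_cases hn : i + 1 = c.length
    · exact Or.inl hn
    · right
      simpa using fun hc => h ⟨by omega, hc⟩
termination_by c.length - i
decreasing_by omega

theorem segEnd_eq (c : List String) (p : List Int) (j m : Nat) (hjm : j ≤ m)
    (hall : ∀ k, j ≤ k → k < m → k + 1 < c.length ∧ c.getD k "" = c.getD (k + 1) "" ∧ p.getD k 0 < p.getD (k + 1) 0)
    (hstop : ¬ (m + 1 < c.length ∧ c.getD m "" = c.getD (m + 1) "" ∧ p.getD m 0 < p.getD (m + 1) 0)) :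
    segEnd c p j = m := by
  unfold segEnd
  split
  · rename_i h
    rcases Nat.eq_or_lt_of_le hjm with rfl | hjm'
    · exact absurd h hstop
    · exact segEnd_eq c p (j + 1) m (by omega) (fun k hk hk2 => hall k (by omega) hk2) hstop
  · rename_i h
    rcases Nat.eq_or_lt_of_le hjm with rfl | hjm'
    · rfl
    · exact absurd (hall j le_rfl hjm') h
termination_by m - j
decreasing_by omega

theorem const_chain (c : List String) (s e : Nat)
    (hrun : ∀ k, s ≤ k → k + 1 < e → c.getD k "" = c.getD (k + 1) "")
    (b : Nat) (hsb : s ≤ b) (hbe : b < e) : c.getD b "" = c.getD s "" := by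
  induction b with
  | zero => have : s = 0 := by omega
            rw [this]
  | succ b ih =>
    rcases Nat.eq_or_lt_of_le hsb with heq | hlt
    · rw [heq]
    · have h1 := ih (by omega) (by omega)
      have h2 := hrun b (by omega) (by omega)
      rw [← h2]
      exact h1

theorem inner_eq (c : List String) (p d : List Int) (s e ss j : Nat)
    (he : e ≤ c.length)
    (hrun : ∀ k, s ≤ k → k + 1 < e → c.getD k "" = c.getD (k + 1) "")
    (hbound : e = c.length ∨ c.getD (e - 1) "" ≠ c.getD e "")
    (hs : s ≤ ss) (hsj : ss ≤ j) (hje : j < e)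
    (hinc : ∀ k, ss ≤ k → k < j → p.getD k 0 < p.getD (k + 1) 0)
    (hrest : outerA c p d e = loopB c p d e) :
    ((innerA c p d s e ss j).1 ++ (outerA c p d e).1,
     (innerA c p d s e ss j).2 ++ (outerA c p d e).2) = loopB c p d ss := by
  have hssn : ss < c.length := by omega
  have hcs : c.getD ss "" = c.getD s "" := const_chain c s e hrun ss hs (by omega)
  unfold innerA
  rw [dif_pos hje]
  by_cases hc1 : j < e - 1 ∧ p.getD j 0 ≥ p.getD (j + 1) 0
  · rw [if_pos hc1]
    have hseg : segEnd c p ss = j :=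
      segEnd_eq c p ss j hsj
        (fun k hk hk2 => ⟨by omega, hrun k (by omega) (by omega), hinc k hk hk2⟩)
        (fun hcon => absurd hcon.2.2 (not_lt.mpr hc1.2))
    have hIH := inner_eq c p d s e (j + 1) (j + 1) he hrun hbound (by omega) le_rfl
        (by omega) (by intro k hk hk2; omega) hrest
    have h1 : (innerA c p d s e (j + 1) (j + 1)).1 ++ (outerA c p d e).1 = (loopB c p d (j + 1)).1 :=
      congrArg Prod.fst hIH
    have h2 : (innerA c p d s e (j + 1) (j + 1)).2 ++ (outerA c p d e).2 = (loopB c p d (j + 1)).2 :=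
      congrArg Prod.snd hIH
    rw [loopB, dif_pos hssn, hseg]
    simp only [List.cons_append, h1, h2, hcs]
  · rw [if_neg hc1]
    by_cases hc2 : j = e - 1
    · rw [if_pos hc2]
      have hje1 : j + 1 = e := by omega
      have hseg : segEnd c p ss = j :=
        segEnd_eq c p ss j hsj
          (fun k hk hk2 => ⟨by omega, hrun k (by omega) (by omega), hinc k hk hk2⟩)
          (fun hcon => by
            rcases hbound with hb | hb
            · omega
            · exact hb (by rw [← hje1]; simpa [hc2] using hcon.2.1))
      rw [loopB, dif_pos hssn, hseg, hje1, ← hrest]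
      simp only [List.singleton_append, hcs]
    · rw [if_neg hc2]
      have pj : p.getD j 0 < p.getD (j + 1) 0 := by
        by_contra hp
        exact hc1 ⟨by omega, by omega⟩
      exact inner_eq c p d s e ss (j + 1) he hrun hbound hs (by omega) (by omega)
        (by intro k hk hk2
            rcases Nat.lt_or_ge k j with h' | h'
            · exact hinc k hk h'
            · have : k = j := by omega
              rw [this]; exact pj) hrest
termination_by e - j
decreasing_by all_goals omega

theorem outer_eq (c : List String) (p d : List Int) (i : Nat) :
    outerA c p d i = loopB c p d i := by
  by_cases hi : i < c.length
  · obtain ⟨he, hrun, hbound⟩ := runEnd_props c i hi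
    have hgt := runEnd_gt c i
    have hrest : outerA c p d (runEnd c i) = loopB c p d (runEnd c i) :=
      outer_eq c p d (runEnd c i)
    have hmain := inner_eq c p d i (runEnd c i) i i he hrun hbound le_rfl le_rfl hgt
      (by intro k hk hk2; omega) hrest
    rw [outerA, dif_pos hi]
    exact hmain
  · rw [outerA, dif_neg hi, loopB, dif_neg hi]
termination_by c.length - i
decreasing_by omega

-- ===== VERDICT (by name: the statement is the Claim_ definition above) =====
theorem merge_chord_spec : Claim_equal_merge_chord := by
  intro c p d _ _
  unfold Spec_merge_chord merge_chord merge_chord_alt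
  exact outer_eq c p d 0
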